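-- pv_equiv track=rewrite | github.com/analisto/cian_ru | scripts/scraper.py | _address_parts
-- ===== SOURCE A (Python) =====
-- def _address_parts(address: list) -> dict:
--     """Extract city, district, street, house from the address array."""
--     parts = {"city": "", "district": "", "street": "", "house": ""}
--     for item in address:
--         geo_type = item.get("geoType", "")
--         title    = item.get("title", "")
--         if geo_type == "location" and not parts["city"]:
--             parts["city"] = title
--         elif geo_type == "district" and not parts["district"]:
--             parts["district"] = title
--         elif geo_type == "street" and not parts["street"]:
--             parts["street"] = title
--         elif geo_type == "house" and not parts["house"]:
--             parts["house"] = title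
--     return parts
-- ===== SOURCE B (Python) =====
-- def _address_parts(address: list) -> dict:
--     """Extract city, district, street, house from the address array."""
--     parts = {"city": "", "district": "", "street": "", "house": ""}
--     for geo_type, field in (("location", "city"), ("district", "district"),
--                             ("street", "street"), ("house", "house")):
--         for item in address:
--             title = item.get("title", "")
--             if item.get("geoType", "") == geo_type and title:
--                 parts[field] = title
--                 break
--     return parts
-- ===== Notes on version B (the rewrite author's own statement) =====
-- stated objective: alternative
-- what changed: Replaces the single accumulating pass with an elif chain and mutable first-write-wins state by an outer loop over the four (geoType, field) targets, each doing an independent scan for the first item of that geoType with a non-empty title.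
import Mathlib
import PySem

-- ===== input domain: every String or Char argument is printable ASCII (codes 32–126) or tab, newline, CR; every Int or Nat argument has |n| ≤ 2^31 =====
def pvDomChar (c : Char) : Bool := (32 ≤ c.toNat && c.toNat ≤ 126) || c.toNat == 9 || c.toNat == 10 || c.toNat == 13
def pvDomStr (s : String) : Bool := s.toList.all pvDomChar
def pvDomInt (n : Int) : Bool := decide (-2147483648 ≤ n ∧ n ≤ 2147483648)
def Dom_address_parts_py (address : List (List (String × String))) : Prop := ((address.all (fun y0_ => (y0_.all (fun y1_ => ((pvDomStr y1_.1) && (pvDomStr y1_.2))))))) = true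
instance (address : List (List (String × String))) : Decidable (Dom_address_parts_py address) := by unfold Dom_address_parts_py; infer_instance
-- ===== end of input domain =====

-- B (alternative): replaces A's single accumulating pass with an elif chain by four independent
-- first-match scans, one per (geoType, field) target; same cost, different decomposition.
-- ===== PORT A =====
-- state is the dict's four fixed entries (city, district, street, house), updated first-write-wins
def pvStepA (p : String × String × String × String) (item : List (String × String)) :
    String × String × String × String :=
  let g := PySem.Dict.getD (PySem.Dict.mk item) "geoType" ""
  let t := PySem.Dict.getD (PySem.Dict.mk item) "title" ""
  match p with
  | (c, d, s, h) =>
    if g = "location" ∧ c = "" then (t, d, s, h)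
    else if g = "district" ∧ d = "" then (c, t, s, h)
    else if g = "street" ∧ s = "" then (c, d, t, h)
    else if g = "house" ∧ h = "" then (c, d, s, t)
    else (c, d, s, h)

def address_parts_py (address : List (List (String × String))) : List (String × String) :=
  match address.foldl pvStepA ("", "", "", "") with
  | (c, d, s, h) => [("city", c), ("district", d), ("street", s), ("house", h)]

-- ===== PORT B =====
-- inner scan of B: first item whose geoType is `geo` and whose title is non-empty
def pvFindGeo (address : List (List (String × String))) (geo : String) : String :=
  match address with
  | [] => ""
  | item :: rest =>
    let t := PySem.Dict.getD (PySem.Dict.mk item) "title" ""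
    if PySem.Dict.getD (PySem.Dict.mk item) "geoType" "" = geo ∧ t ≠ "" then t
    else pvFindGeo rest geo

def address_parts_py_alt (address : List (List (String × String))) : List (String × String) :=
  [("city", pvFindGeo address "location"), ("district", pvFindGeo address "district"),
   ("street", pvFindGeo address "street"), ("house", pvFindGeo address "house")]

-- ===== PRECONDITION & SPEC =====
def Spec_address_parts_py (address : List (List (String × String))) (out : List (String × String)) : Prop := out = address_parts_py_alt address
instance (address : List (List (String × String))) (out : List (String × String)) : Decidable (Spec_address_parts_py address out) := by unfold Spec_address_parts_py; infer_instance

-- ===== CLAIM (what is proved, stated in full; the proofs are below) =====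
def Claim_equal_address_parts_py : Prop := ∀ (address : List (List (String × String))), Dom_address_parts_py address → Spec_address_parts_py address (address_parts_py address)

-- ===== LEMMAS AND PROOFS =====
-- first-write-wins: continuing the fold from x is "x if already set, else the first find in the rest"
def pvUpd (address : List (List (String × String))) (geo x : String) : String :=
  if x = "" then pvFindGeo address geo else x

-- a slot this item cannot fill (wrong geoType, empty title, or slot already set) skips the item
theorem pvUpd_cons_skip (item : List (String × String))
    (rest : List (List (String × String))) (geo x : String)
    (hmatch : PySem.Dict.getD (PySem.Dict.mk item) "geoType" "" = geo →
      PySem.Dict.getD (PySem.Dict.mk item) "title" "" ≠ "" → x ≠ "") :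
    pvUpd (item :: rest) geo x = pvUpd rest geo x := by
  by_cases hx : x = "" <;> simp [pvUpd, pvFindGeo, hx]
  intro hg ht; exact absurd hx (hmatch hg ht)

-- an empty slot whose geoType this item carries: both sides take the title iff non-empty
theorem pvUpd_cons_hit (item : List (String × String))
    (rest : List (List (String × String))) (geo x : String)
    (hg : PySem.Dict.getD (PySem.Dict.mk item) "geoType" "" = geo) (hx : x = "") :
    pvUpd (item :: rest) geo x =
      pvUpd rest geo (PySem.Dict.getD (PySem.Dict.mk item) "title" "") := by
  by_cases ht : PySem.Dict.getD (PySem.Dict.mk item) "title" "" = "" <;>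
    simp [pvUpd, pvFindGeo, hx, hg, ht]

theorem pvFoldA (address : List (List (String × String))) :
    ∀ c d s h, address.foldl pvStepA (c, d, s, h) =
      (pvUpd address "location" c, pvUpd address "district" d,
       pvUpd address "street" s, pvUpd address "house" h) := by
  induction address with
  | nil => intro c d s h; simp [pvUpd, pvFindGeo]
  | cons item rest ih =>
    intro c d s h
    simp only [List.foldl_cons, pvStepA]
    split_ifs with h1 h2 h3 h4 <;> rw [ih]
    · rw [pvUpd_cons_hit item rest _ c h1.1 h1.2,
        pvUpd_cons_skip item rest "district" d (fun hg _ => absurd (h1.1.symm.trans hg) (by decide)),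
        pvUpd_cons_skip item rest "street" s (fun hg _ => absurd (h1.1.symm.trans hg) (by decide)),
        pvUpd_cons_skip item rest "house" h (fun hg _ => absurd (h1.1.symm.trans hg) (by decide))]
    · rw [pvUpd_cons_hit item rest _ d h2.1 h2.2,
        pvUpd_cons_skip item rest "location" c (fun hg _ => absurd (h2.1.symm.trans hg) (by decide)),
        pvUpd_cons_skip item rest "street" s (fun hg _ => absurd (h2.1.symm.trans hg) (by decide)),
        pvUpd_cons_skip item rest "house" h (fun hg _ => absurd (h2.1.symm.trans hg) (by decide))]
    · rw [pvUpd_cons_hit item rest _ s h3.1 h3.2,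
        pvUpd_cons_skip item rest "location" c (fun hg _ => absurd (h3.1.symm.trans hg) (by decide)),
        pvUpd_cons_skip item rest "district" d (fun hg _ => absurd (h3.1.symm.trans hg) (by decide)),
        pvUpd_cons_skip item rest "house" h (fun hg _ => absurd (h3.1.symm.trans hg) (by decide))]
    · rw [pvUpd_cons_hit item rest _ h h4.1 h4.2,
        pvUpd_cons_skip item rest "location" c (fun hg _ => absurd (h4.1.symm.trans hg) (by decide)),
        pvUpd_cons_skip item rest "district" d (fun hg _ => absurd (h4.1.symm.trans hg) (by decide)),
        pvUpd_cons_skip item rest "street" s (fun hg _ => absurd (h4.1.symm.trans hg) (by decide))]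
    · rw [pvUpd_cons_skip item rest "location" c (fun hg _ hx => h1 ⟨hg, hx⟩),
        pvUpd_cons_skip item rest "district" d (fun hg _ hx => h2 ⟨hg, hx⟩),
        pvUpd_cons_skip item rest "street" s (fun hg _ hx => h3 ⟨hg, hx⟩),
        pvUpd_cons_skip item rest "house" h (fun hg _ hx => h4 ⟨hg, hx⟩)]

-- ===== VERDICT (by name: the statement is the Claim_ definition above) =====
theorem address_parts_py_spec : Claim_equal_address_parts_py := by
  intro address _
  unfold Spec_address_parts_py address_parts_py address_parts_py_alt
  rw [pvFoldA]
  simp [pvUpd]
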